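-- pv_equiv track=rewrite | github.com/CBernjus/adventofcode | 2020/python/day_10.py | count_chains_of_ones
-- ===== SOURCE A (Python) =====
-- def convert_to_jumps(adapters):
--     jumps = [adapters[0]]
--
--     for i in range(1, len(adapters)):
--         prev = adapters[i - 1]
--         curr = adapters[i]
--         jumps.append(curr - prev)
--
--     jumps.append(3)
--     return jumps
--
-- def count_chains_of_ones(adapters):
--     jumps = convert_to_jumps(adapters)
--
--     chains = {
--     }
--
--     chain = 0
--
--     for jump in jumps:
--         if jump == 1:
--             chain += 1
--         else:
--             if chain in chains:
--                 chains[chain] += 1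
--             else:
--                 chains[chain] = 1
--             chain = 0
--
--     return chains
-- ===== SOURCE B (Python) =====
-- def convert_to_jumps(adapters):
--     jumps = [adapters[0]]
--
--     for i in range(1, len(adapters)):
--         jumps.append(adapters[i] - adapters[i - 1])
--
--     jumps.append(3)
--     return jumps
--
-- def count_chains_of_ones(adapters):
--     s = ''.join('1' if j == 1 else ' ' for j in convert_to_jumps(adapters))
--     chains = {}
--     for seg in s.split(' ')[:-1]:
--         chains[len(seg)] = chains.get(len(seg), 0) + 1
--     return chains
-- ===== Notes on version B (the rewrite author's own statement) =====
-- stated objective: alternative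
-- what changed: Replaces the dict-plus-running-counter fold over the jumps with run-length extraction by string segmentation: each jump is rendered as '1' or a space, the joined string is split on spaces, the trailing (always empty) segment is dropped, and the segment lengths are tallied into the dict.
import Mathlib
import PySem

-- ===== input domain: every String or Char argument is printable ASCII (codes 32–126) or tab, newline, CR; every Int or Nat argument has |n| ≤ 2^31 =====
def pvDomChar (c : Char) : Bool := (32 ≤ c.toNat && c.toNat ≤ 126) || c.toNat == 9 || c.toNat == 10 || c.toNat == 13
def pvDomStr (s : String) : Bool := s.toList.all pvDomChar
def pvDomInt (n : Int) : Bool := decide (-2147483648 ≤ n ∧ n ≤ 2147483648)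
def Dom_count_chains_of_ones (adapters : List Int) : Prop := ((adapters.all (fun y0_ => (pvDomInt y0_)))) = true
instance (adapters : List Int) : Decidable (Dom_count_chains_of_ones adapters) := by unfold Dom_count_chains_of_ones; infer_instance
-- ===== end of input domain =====

-- B counts chain lengths by string segmentation (join/split) instead of A's dict-plus-counter fold; same results, similar cost.

-- ===== PORT A =====
-- shared helper, verbatim in both Python sources; adapters[0] raises IndexError on [] (outside Pre_, none branch)
def convert_to_jumps (adapters : List Int) : List Int :=
  match PySem.List.pyGet? adapters 0 with
  | none => []
  | some a0 =>
    let jumps := (PySem.List.pyRange 1 (PySem.List.len adapters) 1).foldl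
      (fun js i =>
        let prev := PySem.List.pyGetD adapters (i - 1) 0
        let curr := PySem.List.pyGetD adapters i 0
        js ++ [curr - prev]) [a0]
    jumps ++ [3]

def count_chains_of_ones (adapters : List Int) : List (Int × Int) :=
  let jumps := convert_to_jumps adapters
  let res := jumps.foldl
    (fun (st : PySem.Dict Int Int × Int) jump =>
      if jump == 1 then (st.1, st.2 + 1)
      else (if st.1.contains st.2 then st.1.modify st.2 0 (· + 1) else st.1.insert st.2 1, 0))
    (PySem.Dict.empty, 0)
  res.1.items

-- ===== PORT B =====
def count_chains_of_ones_alt (adapters : List Int) : List (Int × Int) :=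
  let s := PySem.Str.join "" ((convert_to_jumps adapters).map (fun j => if j == 1 then "1" else " "))
  -- s.split(' '): the separator " " is nonempty, so split? is always `some`
  let segs := PySem.List.slice ((PySem.Str.split? s " ").getD []) none (some (-1))
  let chains := segs.foldl
    (fun d seg => d.insert (PySem.Str.len seg) (d.getD (PySem.Str.len seg) 0 + 1))
    PySem.Dict.empty
  chains.items

-- ===== PRECONDITION & SPEC =====
-- Pre_ excludes only the empty list, on which the Python A raises IndexError (adapters[0]).
def Pre_count_chains_of_ones (adapters : List Int) : Prop := adapters ≠ []
instance (adapters : List Int) : Decidable (Pre_count_chains_of_ones adapters) := by unfold Pre_count_chains_of_ones; infer_instance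
def pvWitness_count_chains_of_ones : List Int := [1, 2, 3]
def Spec_count_chains_of_ones (adapters : List Int) (out : List (Int × Int)) : Prop := out = count_chains_of_ones_alt adapters
instance (adapters : List Int) (out : List (Int × Int)) : Decidable (Spec_count_chains_of_ones adapters out) := by unfold Spec_count_chains_of_ones; infer_instance

-- ===== CLAIM (what is proved, stated in full; the proofs are below) =====
def Claim_equal_count_chains_of_ones : Prop := ∀ (adapters : List Int), Dom_count_chains_of_ones adapters → Pre_count_chains_of_ones adapters → Spec_count_chains_of_ones adapters (count_chains_of_ones adapters)

-- ===== LEMMAS AND PROOFS =====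

-- the char each jump is rendered as in B
def fChar (j : Int) : Char := if j = 1 then '1' else ' '

-- splitting a char list on ' ' (Python str.split(' ') semantics), structural version
def splitSp : List Char → List (List Char)
  | [] => [[]]
  | c :: rest =>
    if c = ' ' then [] :: splitSp rest
    else
      match splitSp rest with
      | [] => [[c]]
      | s :: ss => (c :: s) :: ss

lemma splitSp_ne_nil (l : List Char) : splitSp l ≠ [] := by
  cases l with
  | nil => simp [splitSp]
  | cons c rest =>
    simp only [splitSp]
    split
    · simp
    · split <;> simp

lemma go_eq (fuel : Nat) : ∀ (l cur : List Char) (acc : List (List Char)), l.length ≤ fuel →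
    PySem.Chars.splitOn.go [' '] fuel l cur acc
      = acc.reverse ++ (match splitSp l with
          | [] => []
          | s :: ss => (cur.reverse ++ s) :: ss) := by
  induction fuel with
  | zero =>
    intro l cur acc h
    have : l = [] := List.eq_nil_of_length_eq_zero (Nat.le_zero.mp h)
    subst this
    simp [PySem.Chars.splitOn.go, splitSp]
  | succ n ih =>
    intro l cur acc h
    cases l with
    | nil => simp [PySem.Chars.splitOn.go, splitSp]
    | cons c rest =>
      have hlen : rest.length ≤ n := by simpa using h
      by_cases hc : c = ' '
      · subst hc
        have hpre : [' '].isPrefixOf (' ' :: rest) = true := by simp [List.isPrefixOf]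
        simp only [PySem.Chars.splitOn.go, hpre, if_true, List.length_cons, List.drop_succ_cons,
          List.length_nil, List.drop_zero]
        rw [ih rest [] (cur.reverse :: acc) hlen]
        rcases h' : splitSp rest with _ | ⟨s, ss⟩
        · exact absurd h' (splitSp_ne_nil rest)
        · simp [splitSp, h']
      · have hpre : [' '].isPrefixOf (c :: rest) = false := by
          simp [List.isPrefixOf]
          exact fun h'' => absurd h''.symm hc
        simp only [PySem.Chars.splitOn.go, hpre, Bool.false_eq_true, if_false]
        rw [ih rest (c :: cur) acc hlen]
        rcases h' : splitSp rest with _ | ⟨s, ss⟩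
        · exact absurd h' (splitSp_ne_nil rest)
        · simp [splitSp, h', hc]

-- Chars.splitOn on the single-char separator ' ' is splitSp
lemma splitOn_sp (cs : List Char) : PySem.Chars.splitOn cs [' '] = splitSp cs := by
  unfold PySem.Chars.splitOn
  rw [go_eq (cs.length + 1) cs [] [] (by omega)]
  rcases h : splitSp cs with _ | ⟨s, ss⟩
  · exact absurd h (splitSp_ne_nil cs)
  · simp

-- per-input segment lengths
def headSucc : List Int → List Int
  | [] => []
  | a :: as => (a + 1) :: as

def lens : List Int → List Int
  | [] => [0]
  | j :: r => if j = 1 then headSucc (lens r) else 0 :: lens r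

lemma lens_ne_nil (js : List Int) : lens js ≠ [] := by
  induction js with
  | nil => simp [lens]
  | cons j r ih =>
    simp only [lens]
    split
    · cases h : lens r with
      | nil => exact absurd h ih
      | cons a as => simp [headSucc]
    · simp

lemma map_length_splitSp (js : List Int) :
    (splitSp (js.map fChar)).map (fun s => (s.length : Int)) = lens js := by
  induction js with
  | nil => simp [splitSp, lens]
  | cons j r ih =>
    by_cases hj : j = 1
    · have hc : fChar j = '1' := by simp [fChar, hj]
      simp only [List.map_cons, hc, splitSp, if_neg (by decide : ¬ ('1' = ' '))]
      rcases h' : splitSp (r.map fChar) with _ | ⟨s, ss⟩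
      · exact absurd h' (splitSp_ne_nil _)
      · rw [h'] at ih
        simp only [List.map_cons] at ih ⊢
        simp only [lens, if_pos hj]
        rcases hl : lens r with _ | ⟨a, as⟩
        · exact absurd hl (lens_ne_nil r)
        · rw [hl] at ih
          simp only [headSucc]
          have h1 : (s.length : Int) = a := (List.cons.injEq _ _ _ _ ▸ ih).1
          have h2 : ss.map (fun s => (s.length : Int)) = as := (List.cons.injEq _ _ _ _ ▸ ih).2
          simp [h1, h2]
    · have hc : fChar j = ' ' := by simp [fChar, hj]
      simp only [List.map_cons, hc, splitSp, lens, if_neg hj]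
      simpa using ih

def chainsOf : Int → List Int → List Int
  | _, [] => []
  | c, j :: r => if j = 1 then chainsOf (c + 1) r else c :: chainsOf 0 r

def headAdd (c : Int) : List Int → List Int
  | [] => []
  | a :: as => (c + a) :: as

lemma chainsOf_eq (js : List Int) : ∀ (c : Int), chainsOf c js = (headAdd c (lens js)).dropLast := by
  induction js with
  | nil => intro c; simp [chainsOf, lens, headAdd]
  | cons j r ih =>
    intro c
    by_cases hj : j = 1
    · simp only [chainsOf, if_pos hj, lens, headSucc]
      rw [ih (c + 1)]
      rcases hl : lens r with _ | ⟨a, as⟩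
      · simp [headAdd]
      · simp only [headAdd]
        have : c + (a + 1) = c + 1 + a := by omega
        rw [this]
    · simp only [chainsOf, if_neg hj, lens, headAdd]
      rw [ih 0]
      rcases hl : lens r with _ | ⟨a, as⟩
      · exact absurd hl (lens_ne_nil r)
      · simp [headAdd, List.dropLast]

lemma foldA (js : List Int) : ∀ (d : PySem.Dict Int Int) (c : Int),
    (js.foldl
      (fun (st : PySem.Dict Int Int × Int) jump =>
        if jump == 1 then (st.1, st.2 + 1)
        else (if st.1.contains st.2 then st.1.modify st.2 0 (· + 1) else st.1.insert st.2 1, 0))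
      (d, c)).1
    = (chainsOf c js).foldl (fun d k => d.insert k (d.getD k 0 + 1)) d := by
  induction js with
  | nil => intro d c; simp [chainsOf]
  | cons j r ih =>
    intro d c
    by_cases hj : j = 1
    · simp only [List.foldl_cons, chainsOf, if_pos hj, if_pos (beq_iff_eq.mpr hj)]
      exact ih d (c + 1)
    · simp only [List.foldl_cons, chainsOf, if_neg hj,
        if_neg (by simpa using hj : ¬ (j == 1) = true)]
      rw [ih _ 0]
      congr 1
      by_cases hco : d.contains c
      · simp [hco, PySem.Dict.modify]
      · rw [PySem.Dict.getD_of_not_contains d 0 (by simpa using hco)]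
        simp [hco]

lemma headAdd_zero (l : List Int) : headAdd 0 l = l := by
  cases l <;> simp [headAdd]

lemma A_eq (js : List Int) :
    ((js.foldl
      (fun (st : PySem.Dict Int Int × Int) jump =>
        if jump == 1 then (st.1, st.2 + 1)
        else (if st.1.contains st.2 then st.1.modify st.2 0 (· + 1) else st.1.insert st.2 1, 0))
      (PySem.Dict.empty, 0)).1).items
    = (PySem.Dict.counter ((lens js).dropLast)).items := by
  rw [foldA, chainsOf_eq, headAdd_zero, PySem.Dict.foldl_insert_getD_add_one_eq_counter]

lemma toList_join_eq (js : List Int) :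
    (PySem.Str.join "" (js.map (fun j => if j == 1 then "1" else " "))).toList
      = js.map fChar := by
  rw [PySem.Str.toList_join]
  have h1 : (js.map (fun j => if j == 1 then "1" else " ")).map String.toList
      = (js.map fChar).map (fun c => [c]) := by
    simp only [List.map_map]
    refine List.map_congr_left ?_
    intro j _
    by_cases hj : j = 1 <;> simp [fChar, hj, Function.comp]
  rw [h1]
  have h0 : ("" : String).toList = [] := rfl
  rw [h0, PySem.Chars.join_nil_singletons]

lemma B_eq (js : List Int) :
    (let s := PySem.Str.join "" (js.map (fun j => if j == 1 then "1" else " "));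
     let segs := PySem.List.slice ((PySem.Str.split? s " ").getD []) none (some (-1));
     let chains := segs.foldl
       (fun d seg => d.insert (PySem.Str.len seg) (d.getD (PySem.Str.len seg) 0 + 1))
       PySem.Dict.empty;
     chains.items)
    = (PySem.Dict.counter ((lens js).dropLast)).items := by
  have hsplit : PySem.Str.split? (PySem.Str.join "" (js.map (fun j => if j == 1 then "1" else " "))) " "
      = some ((splitSp (js.map fChar)).map String.ofList) := by
    have hsep : (" " : String).toList = [' '] := rfl
    simp only [PySem.Str.split?]
    rw [toList_join_eq, hsep]
    simp [PySem.Chars.split?, splitOn_sp]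
  have key : ((splitSp (js.map fChar)).map String.ofList).dropLast.map PySem.Str.len
      = (lens js).dropLast := by
    rw [List.map_dropLast, List.map_map]
    have : (PySem.Str.len ∘ String.ofList) = (fun cs : List Char => (cs.length : Int)) := by
      funext cs; simp [PySem.Str.len]
    rw [this, map_length_splitSp]
  simp only [hsplit, Option.getD_some, PySem.List.slice_to_neg_one]
  rw [← PySem.Dict.foldl_insert_getD_add_one_eq_counter, ← key, List.foldl_map]

lemma body_eq (adapters : List Int) :
    count_chains_of_ones adapters = count_chains_of_ones_alt adapters :=
  (A_eq (convert_to_jumps adapters)).trans (B_eq (convert_to_jumps adapters)).symm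

-- ===== VERDICT (by name: the statement is the Claim_ definition above) =====
theorem count_chains_of_ones_spec : Claim_equal_count_chains_of_ones := by
  intro adapters _ _
  unfold Spec_count_chains_of_ones
  exact body_eq adapters
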